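-- pv_equiv track=rewrite | github.com/Pikatyu8/my-lil-puzzle-game | src/logic/sequence.py | count_sequence_occurrences
-- ===== SOURCE A (Python) =====
-- def count_sequence_occurrences(history, seq, overlapping=False):
--     """
--     Подсчитывает количество вхождений последовательности.
--     """
--     if not seq or len(seq) > len(history):
--         return 0
--
--     count = 0
--     i = 0
--     while i <= len(history) - len(seq):
--         if history[i:i+len(seq)] == seq:
--             count += 1
--             i += 1 if overlapping else len(seq)
--         else:
--             i += 1
--     return count
-- ===== SOURCE B (Python) =====
-- def count_sequence_occurrences(history, seq, overlapping=False):
--     """Two-phase re-implementation: first collect all match start positions,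
--     then either count them all (overlapping) or greedily skip positions that
--     fall inside the previously counted match (non-overlapping)."""
--     m = len(seq)
--     if m == 0 or m > len(history):
--         return 0
--     positions = [i for i in range(len(history) - m + 1) if history[i:i+m] == seq]
--     if overlapping:
--         return len(positions)
--     count = 0
--     next_free = 0
--     for p in positions:
--         if p >= next_free:
--             count += 1
--             next_free = p + m
--     return count
-- ===== Notes on version B (the rewrite author's own statement) =====
-- stated objective: alternative
-- what changed: Replaced A's fused while-loop with data-dependent index jumps by a two-phase version: collect all match start positions in one comprehension, then count them directly (overlapping) or with a greedy next_free pass (non-overlapping).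
import Mathlib
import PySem

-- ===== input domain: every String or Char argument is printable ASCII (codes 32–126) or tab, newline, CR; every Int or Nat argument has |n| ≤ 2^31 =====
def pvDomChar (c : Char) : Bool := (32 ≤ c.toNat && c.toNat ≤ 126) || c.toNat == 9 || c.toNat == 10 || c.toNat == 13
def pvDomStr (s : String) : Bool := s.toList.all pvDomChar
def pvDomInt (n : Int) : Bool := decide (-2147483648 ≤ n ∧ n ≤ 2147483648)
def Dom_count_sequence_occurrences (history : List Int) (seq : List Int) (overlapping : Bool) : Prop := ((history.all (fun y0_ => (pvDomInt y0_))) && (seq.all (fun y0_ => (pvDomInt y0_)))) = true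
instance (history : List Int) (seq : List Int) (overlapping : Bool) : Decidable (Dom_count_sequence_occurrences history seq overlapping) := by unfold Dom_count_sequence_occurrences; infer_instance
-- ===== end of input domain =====

-- B replaces A's fused scan-with-skip while-loop by two phases: collect every
-- match start position, then count them directly (overlapping) or with a
-- greedy next_free pass (non-overlapping); objective: alternative structure.

-- ===== PORT A =====
-- A's while loop: i advances by 1 on a mismatch, by 1 (overlapping) or by
-- len(seq) (non-overlapping) on a match.  The hypothesis hm (seq nonempty)
-- holds at the single call site, behind A's early-return guard.
def pvALoop (history seq : List Int) (overlapping : Bool) (hm : 0 < seq.length)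
    (count i : Int) : Int :=
  if h : i ≤ (history.length : Int) - (seq.length : Int) then
    if PySem.List.slice history i (i + (seq.length : Int)) = seq then
      pvALoop history seq overlapping hm (count + 1)
        (i + (if overlapping then 1 else (seq.length : Int)))
    else
      pvALoop history seq overlapping hm count (i + 1)
  else count
termination_by ((history.length : Int) - (seq.length : Int) + 1 - i).toNat
decreasing_by
  · split <;> omega
  · omega

def count_sequence_occurrences (history : List Int) (seq : List Int) (overlapping : Bool) : Int :=
  if hg : seq = [] ∨ (seq.length : Int) > (history.length : Int) then 0
  else
    pvALoop history seq overlapping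
      (by rcases seq with _ | _ <;> simp_all) 0 0

-- ===== PORT B =====
def count_sequence_occurrences_alt (history : List Int) (seq : List Int) (overlapping : Bool) : Int :=
  let m := seq.length
  if seq.length = 0 ∨ (m : Int) > (history.length : Int) then 0
  else
    let positions :=
      (PySem.List.pyRange 0 ((history.length : Int) - (m : Int) + 1) 1).filter
        (fun i : Int => PySem.List.slice history (some i) (some (i + (m : Int))) = seq)
    if overlapping then (positions.length : Int)
    else
      (positions.foldl
        (fun (s : Int × Int) p => if s.2 ≤ p then (s.1 + 1, p + (m : Int)) else s)
        (0, 0)).1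

-- ===== PRECONDITION & SPEC =====
def Spec_count_sequence_occurrences (history : List Int) (seq : List Int) (overlapping : Bool) (out : Int) : Prop := out = count_sequence_occurrences_alt history seq overlapping
instance (history : List Int) (seq : List Int) (overlapping : Bool) (out : Int) : Decidable (Spec_count_sequence_occurrences history seq overlapping out) := by unfold Spec_count_sequence_occurrences; infer_instance

-- ===== CLAIM (what is proved, stated in full; the proofs are below) =====
def Claim_equal_count_sequence_occurrences : Prop := ∀ (history : List Int) (seq : List Int) (overlapping : Bool), Dom_count_sequence_occurrences history seq overlapping → Spec_count_sequence_occurrences history seq overlapping (count_sequence_occurrences history seq overlapping)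

-- ===== LEMMAS AND PROOFS =====

-- match positions from index i on (suffix of B's `positions` list)
def pvPosFrom (history seq : List Int) (i : Int) : List Int :=
  (PySem.List.pyRange i ((history.length : Int) - (seq.length : Int) + 1) 1).filter
    (fun j => PySem.List.slice history j (j + (seq.length : Int)) = seq)

-- B's greedy step
def pvStep (m : Int) (s : Int × Int) (p : Int) : Int × Int :=
  if s.2 ≤ p then (s.1 + 1, p + m) else s

lemma pvPosFrom_empty (history seq : List Int) (i : Int)
    (h : (history.length : Int) - (seq.length : Int) + 1 ≤ i) :
    pvPosFrom history seq i = [] := by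
  unfold pvPosFrom
  rw [PySem.List.pyRange_one_eq_nil h]
  rfl

lemma pvPosFrom_cons (history seq : List Int) (i : Int)
    (h : i ≤ (history.length : Int) - (seq.length : Int)) :
    pvPosFrom history seq i =
      (if PySem.List.slice history i (i + (seq.length : Int)) = seq
        then [i] else []) ++ pvPosFrom history seq (i + 1) := by
  unfold pvPosFrom
  rw [PySem.List.pyRange_one_cons (by omega)]
  simp [List.filter_cons]
  split <;> simp_all

-- elements already inside the last counted match are skipped by the greedy pass
lemma pvFold_skip (history seq : List Int) (c nf j : Int) (hj : j ≤ nf) :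
    (pvPosFrom history seq j).foldl (pvStep (seq.length : Int)) (c, nf)
      = (pvPosFrom history seq nf).foldl (pvStep (seq.length : Int)) (c, nf) := by
  by_cases hb : (history.length : Int) - (seq.length : Int) + 1 ≤ j
  · rw [pvPosFrom_empty _ _ _ hb, pvPosFrom_empty _ _ _ (by omega)]
  · rcases eq_or_lt_of_le hj with rfl | hlt
    · rfl
    · rw [pvPosFrom_cons _ _ _ (by omega)]
      have := pvFold_skip history seq c nf (j + 1) (by omega)
      split
      · simpa [pvStep, not_le.mpr hlt] using this
      · simpa using this
termination_by (nf - j).toNat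

-- the first component of the greedy pass ignores the exact next_free value
-- as long as it does not exceed the start index
lemma pvFold_nf_irrel (history seq : List Int) (j : Int) :
    ∀ c nf nf', nf ≤ j → nf' ≤ j →
    ((pvPosFrom history seq j).foldl (pvStep (seq.length : Int)) (c, nf)).1
      = ((pvPosFrom history seq j).foldl (pvStep (seq.length : Int)) (c, nf')).1 := by
  intro c nf nf' hnf hnf'
  by_cases hb : (history.length : Int) - (seq.length : Int) + 1 ≤ j
  · rw [pvPosFrom_empty _ _ _ hb]; rfl
  · rw [pvPosFrom_cons _ _ _ (by omega)]
    split
    · simp [pvStep, hnf, hnf']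
    · exact pvFold_nf_irrel history seq (j + 1) c nf nf' (by omega) (by omega)
termination_by ((history.length : Int) - (seq.length : Int) + 1 - j).toNat

-- overlapping: A's loop counts every match position from i on
lemma pvALoop_overlap (history seq : List Int) (hm : 0 < seq.length) :
    ∀ i c, pvALoop history seq true hm c i
      = c + ((pvPosFrom history seq i).length : Int) := by
  intro i c
  rw [pvALoop]
  by_cases h : i ≤ (history.length : Int) - (seq.length : Int)
  · rw [dif_pos h, pvPosFrom_cons _ _ _ h]
    split
    · simp only [if_true]
      rw [pvALoop_overlap history seq hm (i + 1) (c + 1)]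
      simp; omega
    · rw [pvALoop_overlap history seq hm (i + 1) c]
      simp
  · rw [dif_neg h, pvPosFrom_empty _ _ _ (by omega)]
    simp
termination_by i _ => ((history.length : Int) - (seq.length : Int) + 1 - i).toNat
decreasing_by all_goals omega

-- non-overlapping: A's loop equals B's greedy pass over the remaining positions
lemma pvALoop_nonoverlap (history seq : List Int) (hm : 0 < seq.length) :
    ∀ i c, pvALoop history seq false hm c i
      = ((pvPosFrom history seq i).foldl (pvStep (seq.length : Int)) (c, i)).1 := by
  intro i c
  rw [pvALoop]
  by_cases h : i ≤ (history.length : Int) - (seq.length : Int)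
  · rw [dif_pos h, pvPosFrom_cons _ _ _ h]
    split
    · simp only [if_neg (Bool.false_ne_true), List.singleton_append, List.foldl_cons]
      have hstep : pvStep (seq.length : Int) (c, i) i = (c + 1, i + (seq.length : Int)) := by
        simp [pvStep]
      rw [hstep, pvFold_skip history seq (c + 1) (i + (seq.length : Int)) (i + 1) (by omega)]
      rw [pvALoop_nonoverlap history seq hm (i + (seq.length : Int)) (c + 1)]
    · simp only [List.nil_append]
      rw [pvALoop_nonoverlap history seq hm (i + 1) c]
      exact pvFold_nf_irrel history seq (i + 1) c (i + 1) i (by omega) (by omega)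
  · rw [dif_neg h, pvPosFrom_empty _ _ _ (by omega)]
    rfl
termination_by i _ => ((history.length : Int) - (seq.length : Int) + 1 - i).toNat
decreasing_by all_goals omega

-- ===== VERDICT (by name: the statement is the Claim_ definition above) =====
theorem count_sequence_occurrences_spec : Claim_equal_count_sequence_occurrences := by
  intro history seq overlapping _
  unfold Spec_count_sequence_occurrences
  unfold count_sequence_occurrences count_sequence_occurrences_alt
  by_cases hg : seq = [] ∨ (seq.length : Int) > (history.length : Int)
  · rw [dif_pos hg, if_pos (by rcases hg with h | h <;> simp_all)]
  · rw [dif_neg hg, if_neg (by push_neg at hg ⊢; exact ⟨by simpa using hg.1, hg.2⟩)]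
    have hm : 0 < seq.length := by rcases seq with _ | _ <;> simp_all
    cases overlapping
    · rw [pvALoop_nonoverlap history seq hm 0 0]
      rfl
    · rw [pvALoop_overlap history seq hm 0 0]
      simp [pvPosFrom]
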